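-- pv_equiv track=rewrite | github.com/pypi-data/pypi-mirror-344 | packages/fastapi-forge/fastapi_forge-0.10.0-py3-none-any.whl/fastapi_forge/project_io.py | _build_enum_usage
-- ===== SOURCE A (Python) =====
-- from typing import Any
--
-- def _build_enum_usage(enum_columns: list[tuple]) -> dict[str, list[dict[str, Any]]]:
--     usage = {}
--     for schema, table, column, data_type, enum_type in enum_columns:
--         if enum_type not in usage:
--             usage[enum_type] = []
--         usage[enum_type].append(
--             {
--                 "schema": schema,
--                 "table": table,
--                 "column": column,
--                 "data_type": data_type,
--             }
--         )
--     return usage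
-- ===== SOURCE B (Python) =====
-- def _build_enum_usage(enum_columns):
--     # Two-pass: collect distinct enum types in first-seen order, then build each
--     # group by a single filtering comprehension per key.
--     keys = list(dict.fromkeys(c[4] for c in enum_columns))
--     return {
--         k: [
--             {"schema": s, "table": t, "column": c, "data_type": d}
--             for s, t, c, d, e in enum_columns
--             if e == k
--         ]
--         for k in keys
--     }
-- ===== Notes on version B (the rewrite author's own statement) =====
-- stated objective: alternative
-- what changed: Replaces the single-pass dict accumulation by a two-pass scheme: first collect the distinct enum types in first-seen order (dict.fromkeys), then build each group with one filtering comprehension per key.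
import Mathlib
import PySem

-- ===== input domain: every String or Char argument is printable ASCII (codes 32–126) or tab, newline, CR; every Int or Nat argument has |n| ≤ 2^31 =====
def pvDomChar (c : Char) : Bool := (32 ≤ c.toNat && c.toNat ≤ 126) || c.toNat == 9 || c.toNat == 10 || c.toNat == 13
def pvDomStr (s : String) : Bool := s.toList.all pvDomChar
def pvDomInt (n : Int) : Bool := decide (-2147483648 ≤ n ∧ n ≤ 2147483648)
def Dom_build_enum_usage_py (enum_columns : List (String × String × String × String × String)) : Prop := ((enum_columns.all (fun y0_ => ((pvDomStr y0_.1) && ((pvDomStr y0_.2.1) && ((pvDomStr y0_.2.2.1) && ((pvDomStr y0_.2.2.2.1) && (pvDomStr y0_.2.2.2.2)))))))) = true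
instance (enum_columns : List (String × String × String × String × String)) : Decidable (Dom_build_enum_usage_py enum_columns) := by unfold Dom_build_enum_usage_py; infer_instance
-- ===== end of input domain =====

-- B groups by two passes (ordered distinct keys, then a filter per key) instead of A's one-pass dict accumulation; same result, alternative structure.

-- ===== PORT A =====
-- A's loop: for each row, ensure the enum_type key exists, then append the row-dict.
def build_enum_usage_py (enum_columns : List (String × String × String × String × String)) : List (String × List (List (String × String))) :=
  (enum_columns.foldl
    (fun usage r =>
      match r with
      | (schema, table, column, data_type, enum_type) =>
        let usage := if usage.contains enum_type then usage else usage.insert enum_type []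
        usage.modify enum_type []
          (fun v => v ++ [[("schema", schema), ("table", table), ("column", column), ("data_type", data_type)]]))
    PySem.Dict.empty).items

-- ===== PORT B =====
-- B: distinct enum types in first-seen order, then one filtering pass per key.
def build_enum_usage_py_alt (enum_columns : List (String × String × String × String × String)) : List (String × List (List (String × String))) :=
  (PySem.List.dedup (enum_columns.map (fun c => c.2.2.2.2))).map
    (fun k =>
      (k, (enum_columns.filter (fun r => r.2.2.2.2 == k)).map
            (fun r => [("schema", r.1), ("table", r.2.1), ("column", r.2.2.1), ("data_type", r.2.2.2.1)])))

-- ===== PRECONDITION & SPEC =====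
def Spec_build_enum_usage_py (enum_columns : List (String × String × String × String × String)) (out : List (String × List (List (String × String)))) : Prop := out = build_enum_usage_py_alt enum_columns
instance (enum_columns : List (String × String × String × String × String)) (out : List (String × List (List (String × String)))) : Decidable (Spec_build_enum_usage_py enum_columns out) := by unfold Spec_build_enum_usage_py; infer_instance

-- ===== CLAIM (what is proved, stated in full; the proofs are below) =====
def Claim_equal_build_enum_usage_py : Prop := ∀ (enum_columns : List (String × String × String × String × String)), Dom_build_enum_usage_py enum_columns → Spec_build_enum_usage_py enum_columns (build_enum_usage_py enum_columns)

-- ===== LEMMAS AND PROOFS =====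

def pvKey (r : String × String × String × String × String) : String := r.2.2.2.2
def pvRow (r : String × String × String × String × String) : List (String × String) :=
  [("schema", r.1), ("table", r.2.1), ("column", r.2.2.1), ("data_type", r.2.2.2.1)]

-- A's combined "ensure key then append" step equals a single modify-with-default.
lemma stepA_eq (d : PySem.Dict String (List (List (String × String)))) (r : String × String × String × String × String) :
    (let d' := if d.contains (pvKey r) then d else d.insert (pvKey r) [];
     d'.modify (pvKey r) [] (fun v => v ++ [pvRow r]))
    = d.modify (pvKey r) [] (fun v => v ++ [pvRow r]) := by
  by_cases h : d.contains (pvKey r) = true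
  · simp [h]
  · simp only [h]
    simp [PySem.Dict.modify, PySem.Dict.getD_insert_self,
      PySem.Dict.insert_insert_self, PySem.Dict.getD_of_not_contains d _ (by simpa using h)]

theorem build_enum_usage_py_spec : Claim_equal_build_enum_usage_py := by
  unfold Claim_equal_build_enum_usage_py
  intro l _
  show build_enum_usage_py l = build_enum_usage_py_alt l
  unfold build_enum_usage_py build_enum_usage_py_alt
  have hstep :
      (fun (usage : PySem.Dict String (List (List (String × String))))
           (r : String × String × String × String × String) =>
        match r with
        | (schema, table, column, data_type, enum_type) =>
          let usage := if usage.contains enum_type then usage else usage.insert enum_type [];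
          usage.modify enum_type []
            (fun v => v ++ [[("schema", schema), ("table", table), ("column", column), ("data_type", data_type)]]))
      = (fun d r => d.modify (pvKey r) [] (fun v => v ++ [pvRow r])) := by
    funext d r
    obtain ⟨s, t, c, dt, e⟩ := r
    exact stepA_eq d (s, t, c, dt, e)
  rw [hstep]
  have hmap :
      l.foldl (fun d r => d.modify (pvKey r) [] (fun v => v ++ [pvRow r])) PySem.Dict.empty
      = (l.map (fun r => (pvKey r, pvRow r))).foldl
          (fun d p => d.modify p.1 [] (fun v => v ++ [p.2])) PySem.Dict.empty := by
    rw [List.foldl_map]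
  rw [hmap]
  have hnd : ((l.map (fun r => (pvKey r, pvRow r))).foldl
      (fun d p => d.modify p.1 [] (fun v => v ++ [p.2])) PySem.Dict.empty).keys.Nodup := by
    exact PySem.Dict.nodup_keys_foldl_modify_key (l.map (fun r => (pvKey r, pvRow r)))
      (fun (p : String × List (String × String)) => p.1) []
      (fun _ (p : String × List (String × String)) v => v ++ [p.2]) PySem.Dict.empty (by simp)
  rw [PySem.Dict.items_eq_map_keys _ hnd []]
  have hkeys : ((l.map (fun r => (pvKey r, pvRow r))).foldl
      (fun d p => d.modify p.1 [] (fun v => v ++ [p.2])) PySem.Dict.empty).keys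
      = PySem.List.dedup (l.map (fun c => c.2.2.2.2)) := by
    rw [PySem.Dict.keys_foldl_modify_key (l.map (fun r => (pvKey r, pvRow r)))
      (fun (p : String × List (String × String)) => p.1) []
      (fun _ (p : String × List (String × String)) v => v ++ [p.2])]
    simp only [List.map_map]
    rfl
  rw [hkeys]
  apply List.map_congr_left
  intro k _
  have hv := PySem.Dict.getD_foldl_modify_append
      (l.map (fun r => (pvKey r, pvRow r))) PySem.Dict.empty k
  rw [hv]
  simp [List.filter_map, Function.comp_def, pvKey, pvRow]
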